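-- pv_equiv track=rewrite | github.com/MrBrantCode/unitest_baseline | mut_generate/mist_train_cf/cf_7091/solution.py | max_column_sum
-- ===== SOURCE A (Python) =====
-- def max_column_sum(numbers):
--     matrix = [[0] * 4 for _ in range(25)]
--
--     for i, num in enumerate(numbers):
--         row = i % 25
--         col = i // 25
--         matrix[row][col] = num
--
--     column_sums = [sum(column) for column in zip(*matrix)]
--     return column_sums.index(max(column_sums))
-- ===== SOURCE B (Python) =====
-- def max_column_sum(numbers):
--     sums = [sum(numbers[25 * c:25 * c + 25]) for c in range(4)]
--     return sums.index(max(sums))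
-- ===== Notes on version B (the rewrite author's own statement) =====
-- stated objective: simpler
-- what changed: Replaces the 25x4 matrix fill plus zip-transpose with four direct slice sums numbers[25*c:25*c+25], then the same index-of-max.
import Mathlib
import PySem

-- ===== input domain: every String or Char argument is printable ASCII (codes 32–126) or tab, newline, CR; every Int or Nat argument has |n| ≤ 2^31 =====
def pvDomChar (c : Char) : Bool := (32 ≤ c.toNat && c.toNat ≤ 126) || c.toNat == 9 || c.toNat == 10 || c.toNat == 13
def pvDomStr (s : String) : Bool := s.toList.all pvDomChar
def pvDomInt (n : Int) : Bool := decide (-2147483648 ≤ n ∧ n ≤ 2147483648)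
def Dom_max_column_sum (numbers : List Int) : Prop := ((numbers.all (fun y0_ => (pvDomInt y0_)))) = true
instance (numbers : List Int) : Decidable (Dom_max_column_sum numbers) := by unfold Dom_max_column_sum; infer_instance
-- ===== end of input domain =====

-- B replaces the 25x4 matrix fill plus zip-transpose with four direct slice sums (simpler decomposition).


-- ===== PORT A =====
-- the loop body: matrix[i % 25][i // 25] = num
def pvStepA (m : List (List Int)) (p : Int × Int) : List (List Int) :=
  let row := PySem.Int.mod p.1 25
  let col := PySem.Int.floordiv p.1 25
  m.modify row.toNat (fun r => r.set col.toNat p.2)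

-- the for-loop over enumerate(numbers) starting from the 25x4 zero matrix
def pvFill (numbers : List Int) : List (List Int) :=
  (PySem.List.enumerate numbers 0).foldl pvStepA (List.replicate 25 (List.replicate 4 (0 : Int)))

def max_column_sum (numbers : List Int) : Int :=
  let matrix := pvFill numbers
  -- zip(*matrix): every row always has length 4, so column j of the transpose is
  -- the list of row entries at index j (exact here; getD's default is never used)
  let column_sums := (PySem.List.pyRange 0 4 1).map (fun j => (matrix.map (fun r => r.getD j.toNat 0)).sum)
  match PySem.List.max? column_sums (fun x => x) with
  | some m => ((PySem.List.index? column_sums m).getD 0 : Int)  -- max(cs) ∈ cs, so .index never raises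
  | none => 0  -- unreachable: column_sums has 4 elements

-- ===== PORT B =====
def max_column_sum_alt (numbers : List Int) : Int :=
  let sums := (PySem.List.pyRange 0 4 1).map
    (fun c => (PySem.List.slice numbers (some (25 * c)) (some (25 * c + 25))).sum)
  match PySem.List.max? sums (fun x => x) with
  | some m => ((PySem.List.index? sums m).getD 0 : Int)  -- max(sums) ∈ sums, so .index never raises
  | none => 0  -- unreachable: sums has 4 elements

-- ===== PRECONDITION & SPEC =====
-- Pre_: A raises IndexError (matrix[row][4]) as soon as a 101st element is processed.
def Pre_max_column_sum (numbers : List Int) : Prop := numbers.length ≤ 100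
instance (numbers : List Int) : Decidable (Pre_max_column_sum numbers) := by unfold Pre_max_column_sum; infer_instance
def pvWitness_max_column_sum : List Int := [3, -1, 4, 1, -5]

def Spec_max_column_sum (numbers : List Int) (out : Int) : Prop := out = max_column_sum_alt numbers
instance (numbers : List Int) (out : Int) : Decidable (Spec_max_column_sum numbers out) := by unfold Spec_max_column_sum; infer_instance

-- ===== CLAIM (what is proved, stated in full; the proofs are below) =====
def Claim_equal_max_column_sum : Prop := ∀ (numbers : List Int), Dom_max_column_sum numbers → Pre_max_column_sum numbers → Spec_max_column_sum numbers (max_column_sum numbers)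

-- ===== LEMMAS AND PROOFS =====

-- the fold keeps the matrix 25 rows long
lemma pvFill_aux_length (l : List (Int × Int)) (m : List (List Int)) :
    (l.foldl pvStepA m).length = m.length := by
  induction l generalizing m with
  | nil => rfl
  | cons p t ih => simp [List.foldl_cons, ih, pvStepA]

-- every row up to index 25 stays 4 long (pointwise)
lemma pvFill_aux_rows (l : List (Int × Int)) (m : List (List Int))
    (h : ∀ i, i < 25 → (m.getD i []).length = 4) :
    ∀ i, i < 25 → ((l.foldl pvStepA m).getD i []).length = 4 := by
  induction l generalizing m with
  | nil => exact h
  | cons p t ih =>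
      refine ih _ (fun i hi => ?_)
      have hh := h i hi
      simp only [pvStepA, List.getD, List.getElem?_modify] at hh ⊢
      cases hm : m[i]? with
      | none => rw [hm] at hh; simp at hh
      | some r =>
          rw [hm] at hh; simp at hh
          simp
          split_ifs <;> simp [hh]

lemma pvFill_length (numbers : List Int) : (pvFill numbers).length = 25 := by
  simp [pvFill, pvFill_aux_length]

lemma pvFill_rows (numbers : List Int) (i : Nat) (hi : i < 25) :
    ((pvFill numbers).getD i []).length = 4 := by
  refine pvFill_aux_rows _ _ (fun j hj => ?_) i hi
  rw [List.getD, List.getElem?_replicate, if_pos hj]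
  simp

-- getD on an appended singleton, away from the new index
lemma getD_append_singleton_ne (xs : List Int) (x : Int) (k : Nat) (hk : k ≠ xs.length) :
    (xs ++ [x]).getD k 0 = xs.getD k 0 := by
  rcases Nat.lt_or_ge k xs.length with h | h
  · simp [List.getD, List.getElem?_append_left h]
  · have h' : xs.length < k := lt_of_le_of_ne h (Ne.symm hk)
    have h1 : (xs ++ [x])[k]? = none := by
      rw [List.getElem?_eq_none] ; simp; omega
    have h2 : xs[k]? = none := by rw [List.getElem?_eq_none]; omega
    simp [List.getD, h1, h2]

-- cell characterisation: after the fill, matrix[r][c] = numbers[25*c + r] (0 when out of range)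
lemma pvFill_cell (numbers : List Int) (h : numbers.length ≤ 100)
    (r c : Nat) (hr : r < 25) (hc : c < 4) :
    ((pvFill numbers).getD r []).getD c 0 = numbers.getD (25 * c + r) 0 := by
  induction numbers using List.reverseRecOn with
  | nil =>
      simp only [pvFill, PySem.List.enumerate_nil, List.foldl_nil]
      have hout : (List.replicate 25 (List.replicate 4 (0:Int))).getD r [] = List.replicate 4 (0:Int) := by
        rw [List.getD, List.getElem?_replicate, if_pos hr]
        rfl
      rw [hout, List.getD, List.getElem?_replicate, if_pos hc]
      rfl
  | append_singleton xs x ih =>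
      have hn99 : xs.length ≤ 99 := by simp [List.length_append] at h; omega
      have hfill : pvFill (xs ++ [x]) = pvStepA (pvFill xs) ((xs.length : Int), x) := by
        simp [pvFill, PySem.List.enumerate_append, PySem.List.enumerate_cons,
          PySem.List.enumerate_nil, List.foldl_append]
      have hrow : (PySem.Int.mod (xs.length : Int) 25).toNat = xs.length % 25 := by
        simp; omega
      have hcol : (PySem.Int.floordiv (xs.length : Int) 25).toNat = xs.length / 25 := by
        simp; omega
      have hMlen : r < (pvFill xs).length := by rw [pvFill_length]; exact hr
      have hMr : (pvFill xs)[r]? = some ((pvFill xs).getD r []) := by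
        rw [List.getD, List.getElem?_eq_getElem hMlen]
        simp
      rw [hfill]
      simp only [pvStepA, hrow, hcol]
      have houter : ∀ (g : List Int → List Int),
          (((pvFill xs).modify (xs.length % 25) g).getD r [])
            = (if xs.length % 25 = r then g ((pvFill xs).getD r []) else (pvFill xs).getD r []) := by
        intro g
        rw [List.getD, List.getElem?_modify, hMr]
        rfl
      rw [houter]
      by_cases hre : xs.length % 25 = r
      · rw [if_pos hre]
        by_cases hce : xs.length / 25 = c
        · have hceq : 25 * c + r = xs.length := by omega
          have hlen4 : ((pvFill xs).getD r []).length = 4 := pvFill_rows xs r hr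
          have hcl : c < ((pvFill xs).getD r []).length := by rw [hlen4]; exact hc
          rw [hce, List.getD, List.getElem?_set_self hcl, hceq, List.getD,
            List.getElem?_concat_length]
        · have hne : 25 * c + r ≠ xs.length := by omega
          rw [List.getD, List.getElem?_set_ne (by omega)]
          rw [getD_append_singleton_ne xs x _ hne, ← ih (by omega)]
          rfl
      · rw [if_neg hre]
        have hne : 25 * c + r ≠ xs.length := by omega
        rw [getD_append_singleton_ne xs x _ hne, ← ih (by omega)]

-- (x::l).map-sum as a Finset.range sum of getD
lemma sum_map_getD (l : List (List Int)) (f : List Int → Int) :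
    (l.map f).sum = ∑ i ∈ Finset.range l.length, f (l.getD i []) := by
  induction l with
  | nil => simp
  | cons x t ih =>
      rw [List.map_cons, List.sum_cons, ih]
      rw [List.length_cons, Finset.sum_range_succ']
      simp [List.getD, add_comm]

-- sum of a take as a Finset.range sum of getD (default 0 absorbs the short case)
lemma sum_take_getD (k : Nat) (l : List Int) :
    (l.take k).sum = ∑ r ∈ Finset.range k, l.getD r 0 := by
  induction k generalizing l with
  | zero => simp
  | succ k ih =>
      cases l with
      | nil => simp [List.getD]
      | cons x t =>
          rw [List.take_succ_cons, List.sum_cons, ih]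
          rw [Finset.sum_range_succ']
          simp [List.getD, add_comm]

-- one column of A's transpose sums to the corresponding slice sum
lemma pv_col_eq (numbers : List Int) (h : numbers.length ≤ 100) (c : Nat) (hc : c < 4) :
    ((pvFill numbers).map (fun r => r.getD c 0)).sum = ((numbers.drop (25 * c)).take 25).sum := by
  rw [sum_map_getD _ _, pvFill_length, sum_take_getD]
  refine Finset.sum_congr rfl (fun r hrm => ?_)
  rw [Finset.mem_range] at hrm
  rw [pvFill_cell numbers h r c hrm hc]
  simp [List.getD, List.getElem?_drop]

-- the two 4-element lists of column sums coincide
lemma pv_lists_eq (numbers : List Int) (h : numbers.length ≤ 100) :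
    ((PySem.List.pyRange 0 4 1).map (fun j => ((pvFill numbers).map (fun r => r.getD j.toNat 0)).sum))
      = ((PySem.List.pyRange 0 4 1).map
          (fun c => (PySem.List.slice numbers (some (25 * c)) (some (25 * c + 25))).sum)) := by
  have hpr : PySem.List.pyRange 0 4 1 = [0, 1, 2, 3] := by decide
  rw [hpr]
  simp only [List.map_cons, List.map_nil]
  have s0 : PySem.List.slice numbers (some (25 * (0:Int))) (some (25 * 0 + 25))
      = (numbers.drop 0).take 25 := by
    rw [PySem.List.slice_toNat _ (by norm_num) (by norm_num)]; simp
  have s1 : PySem.List.slice numbers (some (25 * (1:Int))) (some (25 * 1 + 25))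
      = (numbers.drop 25).take 25 := by
    rw [PySem.List.slice_toNat _ (by norm_num) (by norm_num)]; simp
  have s2 : PySem.List.slice numbers (some (25 * (2:Int))) (some (25 * 2 + 25))
      = (numbers.drop 50).take 25 := by
    rw [PySem.List.slice_toNat _ (by norm_num) (by norm_num)]; simp
  have s3 : PySem.List.slice numbers (some (25 * (3:Int))) (some (25 * 3 + 25))
      = (numbers.drop 75).take 25 := by
    rw [PySem.List.slice_toNat _ (by norm_num) (by norm_num)]; simp
  rw [s0, s1, s2, s3,
    show ((0:Int)).toNat = 0 from rfl, show ((1:Int)).toNat = 1 from rfl,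
    show ((2:Int)).toNat = 2 from rfl, show ((3:Int)).toNat = 3 from rfl,
    pv_col_eq numbers h 0 (by norm_num), pv_col_eq numbers h 1 (by norm_num),
    pv_col_eq numbers h 2 (by norm_num), pv_col_eq numbers h 3 (by norm_num)]

-- ===== VERDICT (by name: the statement is the Claim_ definition above) =====
theorem max_column_sum_spec : Claim_equal_max_column_sum := by
  intro numbers _ hPre
  unfold Spec_max_column_sum
  simp only [max_column_sum, max_column_sum_alt]
  rw [pv_lists_eq numbers hPre]
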